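-- pv_equiv track=rewrite | github.com/chithu221995/ARI | app/email/brief.py | _assemble_html_body
-- ===== SOURCE A (Python) =====
-- from typing import List, Dict, Any
--
-- def _assemble_html_body(items: List[Dict[str, Any]], tickers: List[str]) -> str:
--     """Assemble HTML email body from summary items."""
--     html_parts = [
--         "<html><body style='font-family:Arial,sans-serif;'>",
--         "<h1 style='color:#333;'>Your Daily ARI Brief</h1>",
--         f"<p style='color:#666;'>Latest insights for: <strong>{', '.join(tickers)}</strong></p>",
--         "<hr style='border:none;border-top:1px solid #ddd;margin:20px 0;'>"
--     ]
--
--     if not items: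
--         html_parts.append("<p><em>No recent summaries found for your tickers.</em></p>")
--     else:
--         # Group by ticker
--         by_ticker: Dict[str, List[Dict[str, Any]]] = {}
--         for item in items:
--             ticker = item.get("ticker", "")
--             by_ticker.setdefault(ticker, []).append(item)
--
--         for ticker in tickers:
--             ticker_items = by_ticker.get(ticker, [])
--             if not ticker_items:
--                 continue
--
--             html_parts.append(f"<h2 style='color:#0066cc;margin-top:30px;'>{ticker}</h2>")
--             html_parts.append("<ul style='list-style:none;padding:0;'>")
--
--             for it in ticker_items:
--                 title = it.get("title", "Untitled")
--                 url = it.get("url", "#")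
--                 summary = it.get("summary", "")[:700]  # Safe length limit
--                 rel = it.get("relevance")
--                 sent = (it.get("sentiment") or "").strip()
--
--                 # Build badges
--                 badges = []
--                 if sent:
--                     # Determine sentiment color
--                     sent_lower = sent.lower()
--                     if "positive" in sent_lower:
--                         sentiment_color = "#006400"  # Dark green for contrast
--                         sentiment_text = "Positive"
--                     elif "negative" in sent_lower:
--                         sentiment_color = "#DC143C"  # Crimson red
--                         sentiment_text = "Negative"
--                     else:
--                         sentiment_color = "#555"  # Neutral gray
--                         sentiment_text = sent
--
--                     badges.append(
--                         f"<span style='font-size:12px;padding:2px 6px;border:1px solid #ddd;"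
--                         f"border-radius:4px;margin-left:6px;background:#f5f5f5;'>"
--                         f"Sentiment: <strong><u style='color:{sentiment_color};'>{sentiment_text}</u></strong></span>"
--                     )
--                 badges_html = " ".join(badges)
--
--                 html_parts.append(f"""
--                 <li style="margin-bottom:20px;border-bottom:1px solid #eee;padding-bottom:15px;">
--                   <a href="{url}" target="_blank" style="color:#0066cc;font-weight:bold;text-decoration:none;">{title}</a><br/>
--                   <div style="margin:8px 0;color:#555;line-height:1.5;">{summary}</div>
--                   <div style="margin-top:8px;">{badges_html}</div>
--                 </li>
--                 """)
--
--             html_parts.append("</ul>")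
--
--     html_parts.append("</body></html>")
--     return "".join(html_parts)
-- ===== SOURCE B (Python) =====
-- def _assemble_html_body(items, tickers):
--     """Assemble HTML email body: one pass of filters per ticker, pure string concatenation (no index dict, no parts list)."""
--
--     def render_item(it):
--         title = it.get("title", "Untitled")
--         url = it.get("url", "#")
--         summary = it.get("summary", "")[:700]
--         sent = (it.get("sentiment") or "").strip()
--         badges_html = ""
--         if sent:
--             sent_lower = sent.lower()
--             if "positive" in sent_lower:
--                 color, text = "#006400", "Positive"
--             elif "negative" in sent_lower:
--                 color, text = "#DC143C", "Negative"
--             else: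
--                 color, text = "#555", sent
--             badges_html = (
--                 "<span style='font-size:12px;padding:2px 6px;border:1px solid #ddd;"
--                 "border-radius:4px;margin-left:6px;background:#f5f5f5;'>"
--                 f"Sentiment: <strong><u style='color:{color};'>{text}</u></strong></span>"
--             )
--         return f"""
--                 <li style="margin-bottom:20px;border-bottom:1px solid #eee;padding-bottom:15px;">
--                   <a href="{url}" target="_blank" style="color:#0066cc;font-weight:bold;text-decoration:none;">{title}</a><br/>
--                   <div style="margin:8px 0;color:#555;line-height:1.5;">{summary}</div>
--                   <div style="margin-top:8px;">{badges_html}</div>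
--                 </li>
--                 """
--
--     def render_section(ticker):
--         group = [it for it in items if it.get("ticker", "") == ticker]
--         if not group:
--             return ""
--         return (f"<h2 style='color:#0066cc;margin-top:30px;'>{ticker}</h2>"
--                 "<ul style='list-style:none;padding:0;'>"
--                 + "".join(render_item(it) for it in group)
--                 + "</ul>")
--
--     body = ("<p><em>No recent summaries found for your tickers.</em></p>" if not items
--             else "".join(render_section(t) for t in tickers))
--
--     return ("<html><body style='font-family:Arial,sans-serif;'>"
--             "<h1 style='color:#333;'>Your Daily ARI Brief</h1>"
--             f"<p style='color:#666;'>Latest insights for: <strong>{', '.join(tickers)}</strong></p>"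
--             "<hr style='border:none;border-top:1px solid #ddd;margin:20px 0;'>"
--             + body + "</body></html>")
-- ===== Notes on version B (the rewrite author's own statement) =====
-- stated objective: simpler
-- what changed: Drops the by_ticker index dict and the mutable html_parts accumulator: B filters items per ticker in the one outer loop and builds the result by joining pure per-section / per-item render functions.
import Mathlib
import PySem

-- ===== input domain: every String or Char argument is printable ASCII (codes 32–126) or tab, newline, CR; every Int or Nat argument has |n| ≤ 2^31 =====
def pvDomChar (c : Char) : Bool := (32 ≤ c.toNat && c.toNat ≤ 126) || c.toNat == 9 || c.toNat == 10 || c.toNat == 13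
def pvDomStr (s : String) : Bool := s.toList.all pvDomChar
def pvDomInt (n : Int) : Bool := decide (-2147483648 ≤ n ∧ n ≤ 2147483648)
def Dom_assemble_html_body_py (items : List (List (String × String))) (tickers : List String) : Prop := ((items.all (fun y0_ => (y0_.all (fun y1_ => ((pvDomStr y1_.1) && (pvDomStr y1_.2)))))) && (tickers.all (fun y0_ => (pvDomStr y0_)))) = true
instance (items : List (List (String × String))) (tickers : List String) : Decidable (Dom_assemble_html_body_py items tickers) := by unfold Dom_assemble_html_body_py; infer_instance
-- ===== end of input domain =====

-- B drops A's by_ticker index dict and mutable html_parts list: it filters items per ticker and joins pure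
-- per-section/per-item render functions (objective: simpler). Return values proved equal on all inputs.

-- ===== PORT A =====
-- item.get(k, d) on a Python dict (assoc list, first match) — used by both ports
def pvGet (it : List (String × String)) (k d : String) : String := (PySem.Dict.mk it).getD k d

-- the body of A's inner `for it in ticker_items` loop (builds one <li> part)
def pvItemHtmlA (it : List (String × String)) : String :=
  let title := pvGet it "title" "Untitled"
  let url := pvGet it "url" "#"
  let summary := PySem.Str.slice (pvGet it "summary" "") none (some 700)
  -- (it.get("sentiment") or "") is "" exactly when the value is missing or "": same as .get with default ""
  let sent := PySem.Str.strip (pvGet it "sentiment" "")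
  let badges : List String :=
    if sent == "" then []
    else
      let sent_lower := PySem.Str.lower sent
      let ct :=
        if PySem.Str.isIn "positive" sent_lower then ("#006400", "Positive")
        else if PySem.Str.isIn "negative" sent_lower then ("#DC143C", "Negative")
        else ("#555", sent)
      ["<span style='font-size:12px;padding:2px 6px;border:1px solid #ddd;border-radius:4px;margin-left:6px;background:#f5f5f5;'>Sentiment: <strong><u style='color:" ++ ct.1 ++ ";'>" ++ ct.2 ++ "</u></strong></span>"]
  let badges_html := PySem.Str.join " " badges
  "\n                <li style=\"margin-bottom:20px;border-bottom:1px solid #eee;padding-bottom:15px;\">\n                  <a href=\"" ++ url ++ "\" target=\"_blank\" style=\"color:#0066cc;font-weight:bold;text-decoration:none;\">" ++ title ++ "</a><br/>\n                  <div style=\"margin:8px 0;color:#555;line-height:1.5;\">" ++ summary ++ "</div>\n                  <div style=\"margin-top:8px;\">" ++ badges_html ++ "</div>\n                </li>\n                "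

def assemble_html_body_py (items : List (List (String × String))) (tickers : List String) : String :=
  let head : List String :=
    ["<html><body style='font-family:Arial,sans-serif;'>",
     "<h1 style='color:#333;'>Your Daily ARI Brief</h1>",
     "<p style='color:#666;'>Latest insights for: <strong>" ++ PySem.Str.join ", " tickers ++ "</strong></p>",
     "<hr style='border:none;border-top:1px solid #ddd;margin:20px 0;'>"]
  let html_parts : List String :=
    if items.isEmpty then
      head ++ ["<p><em>No recent summaries found for your tickers.</em></p>"]
    else
      -- by_ticker.setdefault(t, []).append(item)  =  modify t [] (· ++ [item])
      let by_ticker : PySem.Dict String (List (List (String × String))) :=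
        items.foldl (fun d item => d.modify (pvGet item "ticker" "") [] (· ++ [item])) PySem.Dict.empty
      tickers.foldl (fun parts ticker =>
        let ticker_items := by_ticker.getD ticker []
        if ticker_items.isEmpty then parts
        else
          (ticker_items.foldl (fun ps it => ps ++ [pvItemHtmlA it])
            (parts ++ ["<h2 style='color:#0066cc;margin-top:30px;'>" ++ ticker ++ "</h2>",
                       "<ul style='list-style:none;padding:0;'>"])) ++ ["</ul>"]) head
  PySem.Str.join "" (html_parts ++ ["</body></html>"])

-- ===== PORT B =====
-- Source B's render_item
def pvItemHtmlB (it : List (String × String)) : String :=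
  let title := pvGet it "title" "Untitled"
  let url := pvGet it "url" "#"
  let summary := PySem.Str.slice (pvGet it "summary" "") none (some 700)
  let sent := PySem.Str.strip (pvGet it "sentiment" "")
  let badges_html :=
    if sent == "" then ""
    else
      let sent_lower := PySem.Str.lower sent
      let ct :=
        if PySem.Str.isIn "positive" sent_lower then ("#006400", "Positive")
        else if PySem.Str.isIn "negative" sent_lower then ("#DC143C", "Negative")
        else ("#555", sent)
      "<span style='font-size:12px;padding:2px 6px;border:1px solid #ddd;border-radius:4px;margin-left:6px;background:#f5f5f5;'>Sentiment: <strong><u style='color:" ++ ct.1 ++ ";'>" ++ ct.2 ++ "</u></strong></span>"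
  "\n                <li style=\"margin-bottom:20px;border-bottom:1px solid #eee;padding-bottom:15px;\">\n                  <a href=\"" ++ url ++ "\" target=\"_blank\" style=\"color:#0066cc;font-weight:bold;text-decoration:none;\">" ++ title ++ "</a><br/>\n                  <div style=\"margin:8px 0;color:#555;line-height:1.5;\">" ++ summary ++ "</div>\n                  <div style=\"margin-top:8px;\">" ++ badges_html ++ "</div>\n                </li>\n                "

-- Source B's render_section: rescan items for this ticker, emit "" for an empty group
def pvSectionB (items : List (List (String × String))) (ticker : String) : String :=
  let group := items.filter (fun it => pvGet it "ticker" "" == ticker)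
  if group.isEmpty then ""
  else
    "<h2 style='color:#0066cc;margin-top:30px;'>" ++ ticker ++ "</h2>" ++
    "<ul style='list-style:none;padding:0;'>" ++
    PySem.Str.join "" (group.map pvItemHtmlB) ++ "</ul>"

def assemble_html_body_py_alt (items : List (List (String × String))) (tickers : List String) : String :=
  let body :=
    if items.isEmpty then "<p><em>No recent summaries found for your tickers.</em></p>"
    else PySem.Str.join "" (tickers.map (pvSectionB items))
  "<html><body style='font-family:Arial,sans-serif;'>" ++
  "<h1 style='color:#333;'>Your Daily ARI Brief</h1>" ++
  ("<p style='color:#666;'>Latest insights for: <strong>" ++ PySem.Str.join ", " tickers ++ "</strong></p>") ++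
  "<hr style='border:none;border-top:1px solid #ddd;margin:20px 0;'>" ++
  body ++ "</body></html>"

-- ===== PRECONDITION & SPEC =====
def Spec_assemble_html_body_py (items : List (List (String × String))) (tickers : List String) (out : String) : Prop := out = assemble_html_body_py_alt items tickers
instance (items : List (List (String × String))) (tickers : List String) (out : String) : Decidable (Spec_assemble_html_body_py items tickers out) := by unfold Spec_assemble_html_body_py; infer_instance

-- ===== CLAIM (what is proved, stated in full; the proofs are below) =====
def Claim_equal_assemble_html_body_py : Prop := ∀ (items : List (List (String × String))) (tickers : List String), Dom_assemble_html_body_py items tickers → Spec_assemble_html_body_py items tickers (assemble_html_body_py items tickers)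

-- ===== LEMMAS AND PROOFS =====

-- "".join / " ".join helpers at the String level
lemma strJoin_nil (sep : String) : PySem.Str.join sep [] = "" := by
  apply String.toList_inj.mp
  simp [PySem.Str.toList_join, PySem.Chars.join_nil]

lemma strJoin_singleton (sep : String) (x : String) : PySem.Str.join sep [x] = x := by
  apply String.toList_inj.mp
  simp [PySem.Str.toList_join, PySem.Chars.join_singleton]

lemma strJoin0_cons (x : String) (xs : List String) :
    PySem.Str.join "" (x :: xs) = x ++ PySem.Str.join "" xs := by
  cases xs with
  | nil => simp [strJoin_singleton, strJoin_nil]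
  | cons y ys =>
    apply String.toList_inj.mp
    simp [PySem.Str.toList_join, PySem.Chars.join_cons_cons, String.toList_append]

lemma strJoin0_append (xs ys : List String) :
    PySem.Str.join "" (xs ++ ys) = PySem.Str.join "" xs ++ PySem.Str.join "" ys := by
  induction xs with
  | nil => simp [strJoin_nil]
  | cons x xs ih => simp [strJoin0_cons, ih, String.append_assoc]

-- the grouping dict of A, read back per ticker, is exactly B's filter
lemma group_getD (items : List (List (String × String)))
    (d : PySem.Dict String (List (List (String × String)))) (t : String) :
    (items.foldl (fun d item => d.modify (pvGet item "ticker" "") [] (· ++ [item])) d).getD t []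
      = d.getD t [] ++ items.filter (fun it => pvGet it "ticker" "" == t) := by
  induction items generalizing d with
  | nil => simp
  | cons a as ih =>
    simp only [List.foldl_cons, List.filter_cons, ih, PySem.Dict.getD_modify]
    by_cases h : pvGet a "ticker" "" == t
    · simp [eq_of_beq h]
    · have : ¬ (t = pvGet a "ticker" "") := fun he => h (by simp [he])
      simp [h, this]

-- A's ticker loop (skip-or-append-a-chunk) is a flatMap
lemma foldl_skip_append {α β : Type} (p : α → Bool) (f : α → List β) (l : List α) (acc : List β) :
    l.foldl (fun acc x => if p x then acc else acc ++ f x) acc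
      = acc ++ l.flatMap (fun x => if p x then [] else f x) := by
  have hfun : (fun (acc : List β) (x : α) => if p x then acc else acc ++ f x)
      = fun acc x => acc ++ (if p x then [] else f x) := by
    funext acc x; by_cases h : p x <;> simp [h]
  rw [hfun, PySem.List.foldl_append_eq_flatMap]

-- the two item renderers agree (A's " ".join of a 0/1-element badge list is B's string)
lemma itemHtml_eq : pvItemHtmlA = pvItemHtmlB := by
  funext it
  unfold pvItemHtmlA pvItemHtmlB
  by_cases h : PySem.Str.strip (pvGet it "sentiment" "") == ""
  · simp [h, strJoin_nil]
  · simp [h, strJoin_singleton]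

-- one section of A's parts, joined, is B's render_section
lemma section_eq (items : List (List (String × String))) (t : String) :
    PySem.Str.join ""
      (if (items.filter (fun it => pvGet it "ticker" "" == t)).isEmpty then []
       else ["<h2 style='color:#0066cc;margin-top:30px;'>" ++ t ++ "</h2>",
             "<ul style='list-style:none;padding:0;'>"]
            ++ (items.filter (fun it => pvGet it "ticker" "" == t)).map pvItemHtmlA
            ++ ["</ul>"])
      = pvSectionB items t := by
  unfold pvSectionB
  by_cases h : (items.filter (fun it => pvGet it "ticker" "" == t)).isEmpty
  · simp [h, strJoin_nil]
  · simp only [h, if_neg, Bool.false_eq_true, not_false_eq_true,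
               strJoin0_cons, strJoin0_append, strJoin_singleton, itemHtml_eq]

lemma strJoin0_flatMap (f : String → List String) (g : String → String)
    (h : ∀ t, PySem.Str.join "" (f t) = g t) (l : List String) :
    PySem.Str.join "" (l.flatMap f) = PySem.Str.join "" (l.map g) := by
  induction l with
  | nil => simp
  | cons x xs ih => simp [strJoin0_append, strJoin0_cons, ih, h]

-- ===== VERDICT (by name: the statement is the Claim_ definition above) =====
set_option maxRecDepth 40000 in
theorem assemble_html_body_py_spec : Claim_equal_assemble_html_body_py := by
  unfold Claim_equal_assemble_html_body_py
  intro items tickers _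
  unfold Spec_assemble_html_body_py assemble_html_body_py assemble_html_body_py_alt
  by_cases hit : items.isEmpty
  · simp only [hit, if_pos, strJoin0_append, strJoin0_cons, strJoin_singleton]
    apply String.toList_inj.mp
    simp [String.toList_append]
  · simp only [hit, Bool.false_eq_true, if_neg, not_false_eq_true]
    have hfun : (fun (parts : List String) (ticker : String) =>
        if ((items.foldl (fun d item => d.modify (pvGet item "ticker" "") [] (· ++ [item])) PySem.Dict.empty).getD ticker []).isEmpty then parts
        else
          (((items.foldl (fun d item => d.modify (pvGet item "ticker" "") [] (· ++ [item])) PySem.Dict.empty).getD ticker []).foldl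
              (fun ps it => ps ++ [pvItemHtmlA it])
              (parts ++ ["<h2 style='color:#0066cc;margin-top:30px;'>" ++ ticker ++ "</h2>",
                         "<ul style='list-style:none;padding:0;'>"])) ++ ["</ul>"])
        = (fun (parts : List String) (ticker : String) =>
            if (items.filter (fun it => pvGet it "ticker" "" == ticker)).isEmpty then parts
            else parts ++
              (["<h2 style='color:#0066cc;margin-top:30px;'>" ++ ticker ++ "</h2>",
                "<ul style='list-style:none;padding:0;'>"]
               ++ (items.filter (fun it => pvGet it "ticker" "" == ticker)).map pvItemHtmlA
               ++ ["</ul>"])) := by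
      funext parts ticker
      simp only [group_getD, PySem.Dict.getD_empty, List.nil_append,
                 PySem.List.foldl_append_singleton_eq_map, List.append_assoc]
    rw [hfun, foldl_skip_append]
    simp only [strJoin0_append, strJoin0_cons, strJoin_singleton]
    rw [strJoin0_flatMap _ _ (section_eq items) tickers]
    apply String.toList_inj.mp
    simp [String.toList_append]
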